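-- pv_equiv track=rewrite | github.com/jieye-ericx/Trainify-proto | trainify/abstract/divide_tool.py | combine_bound_list
-- ===== SOURCE A (Python) =====
-- from queue import Queue
--
-- def near_bound(current, target, standard):
--     dim = len(current)
--     half_dim = int(dim / 2)
--     counter = 0
--     record_dim = None
--     for i in range(half_dim):
--         if abs(current[i] - target[i]) > standard[i] or abs(current[i + half_dim] - target[i + half_dim]) > \
--                 standard[i]:
--             counter += 1
--             record_dim = i
--     if counter <= 0 or contain(current, target):
--         return True
--     elif counter == 1:
--         if current[record_dim] - target[record_dim + half_dim] <= standard[record_dim] or target[record_dim] - \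
--                 current[
--                     record_dim + half_dim] <= standard[record_dim]:
--             return True
--         elif (target[record_dim] < current[record_dim] < target[record_dim + half_dim]) or (
--                 current[record_dim] < target[record_dim] < current[record_dim + half_dim]):
--             return True
--         else:
--             return False
--     else:
--         return False
--
-- def combine_bound_list(bound_list, std):
--     relation = []
--     length = len(bound_list)
--     compacted_bound_list = []
--     for i in range(length):
--         relation.append([False] * length)
--     for i in range(length):
--         for j in range(length):
--             if i != j and near_bound(bound_list[i], bound_list[j], std):
--                 relation[i][j] = True
--                 relation[j][i] = True
--     # 先构造邻接链表，之后根据表格合并bound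
--     flag_list = [False for i in range(length)]
--     for i in range(length):
--         if flag_list[i]:
--             continue
--         bfs = Queue()
--         bfs_set = set()
--         bfs.put(i)
--         tmp = bound_list[i]
--         while not bfs.empty():
--             index = bfs.get()
--             flag_list[index] = True
--             tmp = combine(tmp, bound_list[index])
--             bfs_set.add(index)
--             near_list = get_near_bound_list(relation, index, bound_list)
--             for near_index in near_list:
--                 if near_index not in bfs_set:
--                     bfs.put(near_index)
--         compacted_bound_list.append(tmp)
--
--     return compacted_bound_list
--
-- def contain(current, target):
--     dim = len(current)
--     half_dim = int(dim / 2)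
--     cur_in_tar = True
--     tar_in_cur = True
--     for i in range(half_dim):
--         if not (current[i] >= target[i] and current[i + half_dim] <= target[i + half_dim]):
--             cur_in_tar = False
--         if not (target[i] >= current[i] and target[i + half_dim] <= current[i + half_dim]):
--             tar_in_cur = False
--     return cur_in_tar or tar_in_cur
--
-- def get_near_bound_list(relation, current_index, bound_list):
--     res_list = []
--     for i in range(len(bound_list)):
--         if i != bound_list and relation[current_index][i]:
--             res_list.append(i)
--     return res_list
--
-- def combine(current, target):
--     res = []
--     dim = len(current)
--     half_dim = int(dim / 2)
--     for i in range(dim):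
--         if i < half_dim:
--             res.append(min(current[i], target[i]))
--         else:
--             res.append(max(current[i], target[i]))
--     return res
-- ===== SOURCE B (Python) =====
-- def near_bound(current, target, standard):
--     dim = len(current)
--     half_dim = int(dim / 2)
--     counter = 0
--     record_dim = None
--     for i in range(half_dim):
--         if abs(current[i] - target[i]) > standard[i] or abs(current[i + half_dim] - target[i + half_dim]) > \
--                 standard[i]:
--             counter += 1
--             record_dim = i
--     if counter <= 0 or contain(current, target):
--         return True
--     elif counter == 1:
--         if current[record_dim] - target[record_dim + half_dim] <= standard[record_dim] or target[record_dim] - \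
--                 current[record_dim + half_dim] <= standard[record_dim]:
--             return True
--         elif (target[record_dim] < current[record_dim] < target[record_dim + half_dim]) or (
--                 current[record_dim] < target[record_dim] < current[record_dim + half_dim]):
--             return True
--         else:
--             return False
--     else:
--         return False
--
--
-- def contain(current, target):
--     dim = len(current)
--     half_dim = int(dim / 2)
--     cur_in_tar = True
--     tar_in_cur = True
--     for i in range(half_dim):
--         if not (current[i] >= target[i] and current[i + half_dim] <= target[i + half_dim]):
--             cur_in_tar = False
--         if not (target[i] >= current[i] and target[i + half_dim] <= current[i + half_dim]):
--             tar_in_cur = False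
--     return cur_in_tar or tar_in_cur
--
--
-- def combine(current, target):
--     res = []
--     dim = len(current)
--     half_dim = int(dim / 2)
--     for i in range(dim):
--         if i < half_dim:
--             res.append(min(current[i], target[i]))
--         else:
--             res.append(max(current[i], target[i]))
--     return res
--
--
-- def combine_bound_list(bound_list, std):
--     # Label-merging connected components instead of a BFS queue:
--     # labels[k] is always the smallest index of k's component among the edges seen so far.
--     n = len(bound_list)
--     labels = list(range(n))
--     for i in range(n):
--         for j in range(i + 1, n):
--             if near_bound(bound_list[i], bound_list[j], std) or near_bound(bound_list[j], bound_list[i], std):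
--                 a, b = labels[i], labels[j]
--                 if a != b:
--                     lo, hi = (a, b) if a < b else (b, a)
--                     labels = [lo if l == hi else l for l in labels]
--     out = []
--     for r in range(n):
--         if labels[r] == r:
--             merged = bound_list[r]
--             for k in range(n):
--                 if labels[k] == r:
--                     merged = combine(merged, bound_list[k])
--             out.append(merged)
--     return out
-- ===== Notes on version B (the rewrite author's own statement) =====
-- stated objective: faster
-- what changed: Replaces A's per-component BFS (queue + visited set over an adjacency matrix built from all n^2 ordered near-pairs, with re-queueing) by one min-label merging pass: the nearness test runs once per unordered pair with short-circuit or, every near pair merges the two label classes down to the smaller label, and one merged box is emitted per label root in index order.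
-- outside the precondition, e.g. on combine_bound_list([[2, -1], [2, -2], [0, 4, 2]], [2]): A returns [[0, 4]], B returns [[0, 4]]; on combine_bound_list([[0], [1, 2, 3, 4]], [0]): A raises IndexError, B returns [[1]]
import Mathlib
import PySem

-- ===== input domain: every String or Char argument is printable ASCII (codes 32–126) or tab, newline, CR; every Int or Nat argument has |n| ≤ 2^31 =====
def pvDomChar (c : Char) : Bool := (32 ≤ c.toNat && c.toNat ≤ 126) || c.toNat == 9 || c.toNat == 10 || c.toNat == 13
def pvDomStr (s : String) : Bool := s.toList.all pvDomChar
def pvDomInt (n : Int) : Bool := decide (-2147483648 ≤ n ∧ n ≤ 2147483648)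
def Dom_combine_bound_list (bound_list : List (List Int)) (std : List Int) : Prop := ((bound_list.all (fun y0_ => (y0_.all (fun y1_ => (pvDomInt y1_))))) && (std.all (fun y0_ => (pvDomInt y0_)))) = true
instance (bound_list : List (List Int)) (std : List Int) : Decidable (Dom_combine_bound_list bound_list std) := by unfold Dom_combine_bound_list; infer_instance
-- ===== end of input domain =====

-- B replaces A's BFS-queue connected-components pass by min-label merging: one label array, relabel on
-- each near pair (tested once per unordered pair), then one merged box per label root (measured faster).

def contain (current target : List Int) : Bool :=
  let half_dim := current.length / 2
  let p := (List.range half_dim).foldl (fun (p : Bool × Bool) i =>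
      ( if current.getD i 0 ≥ target.getD i 0 ∧ current.getD (i + half_dim) 0 ≤ target.getD (i + half_dim) 0 then p.1 else false,
        if target.getD i 0 ≥ current.getD i 0 ∧ target.getD (i + half_dim) 0 ≤ current.getD (i + half_dim) 0 then p.2 else false))
    (true, true)
  p.1 || p.2

def near_bound (current target standard : List Int) : Bool :=
  let half_dim := current.length / 2
  let cr := (List.range half_dim).foldl (fun (cr : Nat × Option Nat) i =>
      if |current.getD i 0 - target.getD i 0| > standard.getD i 0 ∨
         |current.getD (i + half_dim) 0 - target.getD (i + half_dim) 0| > standard.getD i 0 then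
        (cr.1 + 1, some i)
      else cr) (0, none)
  let counter := cr.1
  let rd := cr.2.getD 0
  if counter = 0 ∨ contain current target then true
  else if counter = 1 then
    if current.getD rd 0 - target.getD (rd + half_dim) 0 ≤ standard.getD rd 0 ∨
       target.getD rd 0 - current.getD (rd + half_dim) 0 ≤ standard.getD rd 0 then true
    else if (target.getD rd 0 < current.getD rd 0 ∧ current.getD rd 0 < target.getD (rd + half_dim) 0) ∨
            (current.getD rd 0 < target.getD rd 0 ∧ target.getD rd 0 < current.getD (rd + half_dim) 0) then true
    else false
  else false

def combine (current target : List Int) : List Int :=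
  let dim := current.length
  let half_dim := dim / 2
  (List.range dim).foldl (fun res i =>
    res ++ [if i < half_dim then min (current.getD i 0) (target.getD i 0)
            else max (current.getD i 0) (target.getD i 0)]) []

def get_near_bound_list (relation : List (List Bool)) (current_index : Nat) (bound_list : List (List Int)) : List Nat :=
  (List.range bound_list.length).foldl (fun res i =>
    if (relation.getD current_index []).getD i false then res ++ [i] else res) []


-- helper lemmas used only for bfsLoop's termination measure
lemma pv_gnbl_lt (relation : List (List Bool)) (ci : Nat) (bl : List (List Int)) :
    ∀ y ∈ get_near_bound_list relation ci bl, y < bl.length := by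
  intro y hy
  unfold get_near_bound_list at hy
  rw [PySem.List.foldl_append_if_eq_filter] at hy
  simp only [List.nil_append, List.mem_filter, List.mem_range] at hy
  exact hy.1

lemma pv_set_add_mem {s : List Nat} {x : Nat} (h : x ∈ s) : PySem.Set.add s x = s := by
  simp [PySem.Set.add, PySem.Set.contains, h]

lemma pv_set_add_not_mem {s : List Nat} {x : Nat} (h : x ∉ s) : PySem.Set.add s x = s ++ [x] := by
  simp [PySem.Set.add, PySem.Set.contains, h]

lemma pv_meas2_lt_of_mem (n : Nat) (q new s : List Nat) (index : Nat) (hmem : index ∈ s)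
    (hnew : ∀ y ∈ new, y ∉ s ∧ y < n) :
    ((q ++ new).filter (fun y => decide (y ∈ s) || decide (n ≤ y))).length <
      ((index :: q).filter (fun y => decide (y ∈ s) || decide (n ≤ y))).length := by
  rw [List.filter_append]
  have hnil : new.filter (fun y => decide (y ∈ s) || decide (n ≤ y)) = [] := by
    rw [List.filter_eq_nil_iff]
    intro y hy
    obtain ⟨h1, h2⟩ := hnew y hy
    simp [h1, Nat.not_le.mpr h2]
  rw [hnil, List.append_nil]
  have : (index :: q).filter (fun y => decide (y ∈ s) || decide (n ≤ y)) =
      index :: q.filter (fun y => decide (y ∈ s) || decide (n ≤ y)) := by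
    rw [List.filter_cons_of_pos]; simp [hmem]
  rw [this]
  simp

lemma pv_meas1_lt (n : Nat) (s : List Nat) (index : Nat) (hmem : index ∉ s) (hlt : index < n) :
    (((List.range n).filter (fun k => decide (k ∉ s ++ [index]))).length <
      ((List.range n).filter (fun k => decide (k ∉ s))).length) := by
  have hsub : ((List.range n).filter (fun k => decide (k ∉ s ++ [index]))).Sublist
      ((List.range n).filter (fun k => decide (k ∉ s))) := by
    apply List.monotone_filter_right
    intro x hx
    simp only [decide_eq_true_eq, List.mem_append, List.mem_singleton] at *
    exact fun h => hx (Or.inl h)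
  refine hsub.length_le.lt_of_ne ?_
  intro heq
  have heq2 := hsub.eq_of_length heq
  have h1 : index ∈ (List.range n).filter (fun k => decide (k ∉ s)) := by
    simp [List.mem_filter, List.mem_range, hlt, hmem]
  rw [← heq2] at h1
  simp [List.mem_filter] at h1

lemma pv_meas1_eq (n : Nat) (s : List Nat) (index : Nat) (hge : n ≤ index) :
    (List.range n).filter (fun k => decide (k ∉ s ++ [index])) =
      (List.range n).filter (fun k => decide (k ∉ s)) := by
  apply List.filter_congr
  intro x hx
  simp only [List.mem_range] at hx
  have : x ≠ index := by omega
  simp [this]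

lemma pv_meas2_lt_of_ge (n : Nat) (q new s : List Nat) (index : Nat) (hmem : index ∉ s) (hge : n ≤ index)
    (hnew : ∀ y ∈ new, y ∉ s ++ [index] ∧ y < n) :
    ((q ++ new).filter (fun y => decide (y ∈ s ++ [index]) || decide (n ≤ y))).length <
      ((index :: q).filter (fun y => decide (y ∈ s) || decide (n ≤ y))).length := by
  rw [List.filter_append]
  have hnil : new.filter (fun y => decide (y ∈ s ++ [index]) || decide (n ≤ y)) = [] := by
    rw [List.filter_eq_nil_iff]
    intro y hy
    obtain ⟨h1, h2⟩ := hnew y hy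
    simp only [List.mem_append, List.mem_singleton, not_or] at h1
    simp [h1.1, h1.2, Nat.not_le.mpr h2]
  rw [hnil, List.append_nil]
  have hq : q.filter (fun y => decide (y ∈ s ++ [index]) || decide (n ≤ y)) =
      q.filter (fun y => decide (y ∈ s) || decide (n ≤ y)) := by
    apply List.filter_congr
    intro x _
    by_cases hx : x = index
    · subst hx; simp [hge]
    · simp [hx]
  rw [hq]
  have : (index :: q).filter (fun y => decide (y ∈ s) || decide (n ≤ y)) =
      index :: q.filter (fun y => decide (y ∈ s) || decide (n ≤ y)) := by
    rw [List.filter_cons_of_pos]; simp [hge]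
  rw [this]
  simp

def bfsLoop (bound_list : List (List Int)) (relation : List (List Bool)) :
    List Nat → List Nat → List Int → List Bool → List Int × List Bool × List Nat
  | [], bfs_set, tmp, flags => (tmp, flags, bfs_set)
  | index :: q, bfs_set, tmp, flags =>
      let flags' := flags.set index true
      let tmp' := combine tmp (bound_list.getD index [])
      let set' := PySem.Set.add bfs_set index
      let q' := q ++ (get_near_bound_list relation index bound_list).filter (fun y => decide (y ∉ set'))
      bfsLoop bound_list relation q' set' tmp' flags'
  termination_by q s _ _ => (((List.range bound_list.length).filter (fun k => decide (k ∉ s))).length,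
                             (q.filter (fun y => decide (y ∈ s) || decide (bound_list.length ≤ y))).length)
  decreasing_by
    by_cases hmem : index ∈ bfs_set
    · simp only [pv_set_add_mem hmem]
      apply Prod.Lex.right
      exact pv_meas2_lt_of_mem _ _ _ _ _ hmem (by
        intro y hy
        simp only [List.mem_filter, decide_eq_true_eq] at hy
        exact ⟨hy.2, pv_gnbl_lt _ _ _ _ hy.1⟩)
    · simp only [pv_set_add_not_mem hmem]
      by_cases hlt : index < bound_list.length
      · exact Prod.Lex.left _ _ (pv_meas1_lt _ _ _ hmem hlt)
      · simp only [pv_meas1_eq _ _ _ (Nat.not_lt.mp hlt)]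
        apply Prod.Lex.right
        exact pv_meas2_lt_of_ge _ _ _ _ _ hmem (Nat.not_lt.mp hlt) (by
          intro y hy
          simp only [List.mem_filter, decide_eq_true_eq] at hy
          exact ⟨hy.2, pv_gnbl_lt _ _ _ _ hy.1⟩)

def combine_bound_list (bound_list : List (List Int)) (std : List Int) : List (List Int) :=
  let length := bound_list.length
  let relation0 := (List.range length).foldl (fun rel _ => rel ++ [List.replicate length false]) []
  let relation := (List.range length).foldl (fun rel i =>
      (List.range length).foldl (fun rel j =>
        if i ≠ j ∧ near_bound (bound_list.getD i []) (bound_list.getD j []) std then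
          let rel1 := rel.set i ((rel.getD i []).set j true)
          rel1.set j ((rel1.getD j []).set i true)
        else rel) rel) relation0
  let res := (List.range length).foldl (fun (acc : List (List Int) × List Bool) i =>
      if acc.2.getD i false then acc
      else
        let r := bfsLoop bound_list relation [i] [] (bound_list.getD i []) acc.2
        (acc.1 ++ [r.1], r.2.1))
    ([], List.replicate length false)
  res.1

def combine_bound_list_alt (bound_list : List (List Int)) (std : List Int) : List (List Int) :=
  let n := bound_list.length
  let labels := (List.range n).foldl (fun labels i =>
      (List.range' (i+1) (n - (i+1))).foldl (fun labels j =>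
        if near_bound (bound_list.getD i []) (bound_list.getD j []) std ||
           near_bound (bound_list.getD j []) (bound_list.getD i []) std then
          let a := labels.getD i 0
          let b := labels.getD j 0
          if a ≠ b then
            let lo := min a b
            let hi := max a b
            labels.map (fun l => if l = hi then lo else l)
          else labels
        else labels) labels) (List.range n)
  (List.range n).foldl (fun out r =>
    if labels.getD r 0 = r then
      out ++ [(List.range n).foldl (fun merged k =>
          if labels.getD k 0 = r then combine merged (bound_list.getD k []) else merged)
        (bound_list.getD r [])]
    else out) []

-- ===== PRECONDITION & SPEC =====
-- Pre_ excludes inputs with ≥ 2 bounding boxes whose lengths differ, or whose std is shorter than half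
-- the common box length: on those Python A raises IndexError out of near_bound/combine on almost all of
-- them, and where some out-of-range read happens to be skipped the surviving value is an accident of
-- which indices were reached.
def Pre_combine_bound_list (bound_list : List (List Int)) (std : List Int) : Prop :=
  bound_list.length ≤ 1 ∨
    ((∀ b ∈ bound_list, b.length = (bound_list.headD []).length) ∧
      (bound_list.headD []).length / 2 ≤ std.length)
instance (bound_list : List (List Int)) (std : List Int) : Decidable (Pre_combine_bound_list bound_list std) := by unfold Pre_combine_bound_list; infer_instance

def pvWitness_combine_bound_list : List (List Int) × List Int :=
  ([[0, 0, 2, 2], [1, 1, 3, 3], [10, 10, 11, 11]], [1, 1])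

def Spec_combine_bound_list (bound_list : List (List Int)) (std : List Int) (out : List (List Int)) : Prop := out = combine_bound_list_alt bound_list std
instance (bound_list : List (List Int)) (std : List Int) (out : List (List Int)) : Decidable (Spec_combine_bound_list bound_list std out) := by unfold Spec_combine_bound_list; infer_instance

-- ===== CLAIM (what is proved, stated in full; the proofs are below) =====
def Claim_equal_combine_bound_list : Prop := ∀ (bound_list : List (List Int)) (std : List Int), Dom_combine_bound_list bound_list std → Pre_combine_bound_list bound_list std → Spec_combine_bound_list bound_list std (combine_bound_list bound_list std)

-- ===== LEMMAS AND PROOFS =====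

-- ---------- generic list facts ----------
lemma pv_getD_set {α : Type} (l : List α) (i : Nat) (v : α) (j : Nat) (d : α) :
    (l.set i v).getD j d = if i = j ∧ i < l.length then v else l.getD j d := by
  
  rw [List.getD_eq_getElem?_getD, List.getD_eq_getElem?_getD, List.getElem?_set]
  by_cases h1 : i = j
  · subst h1
    by_cases h2 : i < l.length
    · simp [h2]
    · simp [h2]
  · simp [h1]

lemma pv_getD_map0 (f : Nat → Nat) (l : List Nat) (k : Nat) (hk : k < l.length) :
    (l.map f).getD k 0 = f (l.getD k 0) := by
  rw [List.getD_eq_getElem?_getD, List.getD_eq_getElem?_getD, List.getElem?_map,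
    List.getElem?_eq_getElem hk]
  simp

lemma pv_map_getD_range (l : List Int) : (List.range l.length).map (fun k => l.getD k 0) = l := by
  apply List.ext_getElem
  · simp
  · intro i h1 h2
    simp [List.getD_eq_getElem?_getD, List.getElem?_eq_getElem h2]

-- ---------- shared vocabulary ----------
def bx (bl : List (List Int)) (j : Nat) : List Int := bl.getD j []
def vB (bl : List (List Int)) (k j : Nat) : Int := (bx bl j).getD k 0

def EE (bl : List (List Int)) (std : List Int) (x y : Nat) : Prop :=
  x < bl.length ∧ y < bl.length ∧ x ≠ y ∧
    (near_bound (bx bl x) (bx bl y) std = true ∨ near_bound (bx bl y) (bx bl x) std = true)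

lemma EE_symm (bl : List (List Int)) (std : List Int) (x y : Nat) (h : EE bl std x y) : EE bl std y x := by
  obtain ⟨h1, h2, h3, h4⟩ := h; exact ⟨h2, h1, fun he => h3 he.symm, h4.symm⟩

-- ---------- reflexive-transitive closure toolkit ----------
lemma rtg_symm {r : Nat → Nat → Prop} (hs : ∀ a b, r a b → r b a) {a b : Nat}
    (h : Relation.ReflTransGen r a b) : Relation.ReflTransGen r b a := by
  induction h with
  | refl => exact .refl
  | tail _ hbc ih => exact Relation.ReflTransGen.trans (.single (hs _ _ hbc)) ih

lemma rtg_closed {r : Nat → Nat → Prop} {T : Nat → Prop} (hT : ∀ z w, T z → r z w → T w)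
    {a b : Nat} (ha : T a) (h : Relation.ReflTransGen r a b) : T b := by
  induction h with
  | refl => exact ha
  | tail _ hbc ih => exact hT _ _ ih hbc

lemma rtg_lt {r : Nat → Nat → Prop} {n : Nat} (hbd : ∀ x y, r x y → x < n ∧ y < n)
    {a b : Nat} (ha : a < n) (h : Relation.ReflTransGen r a b) : b < n := by
  induction h with
  | refl => exact ha
  | tail _ hbc _ => exact (hbd _ _ hbc).2

lemma rtg_merge {r : Nat → Nat → Prop} (i j : Nat) {a c : Nat} :
    Relation.ReflTransGen (fun x y => r x y ∨ (x = i ∧ y = j) ∨ (x = j ∧ y = i)) a c ↔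
      Relation.ReflTransGen r a c ∨
        (Relation.ReflTransGen r a i ∧ Relation.ReflTransGen r j c) ∨
        (Relation.ReflTransGen r a j ∧ Relation.ReflTransGen r i c) := by
  constructor
  · intro h
    induction h with
    | refl => exact Or.inl .refl
    | tail hab hbc ih =>
      rename_i b c'
      rcases hbc with hr | ⟨hbi, hcj⟩ | ⟨hbj, hci⟩
      · rcases ih with h1 | ⟨h1, h2⟩ | ⟨h1, h2⟩
        · exact Or.inl (h1.tail hr)
        · exact Or.inr (Or.inl ⟨h1, h2.tail hr⟩)
        · exact Or.inr (Or.inr ⟨h1, h2.tail hr⟩)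
      · subst hbi; subst hcj
        rcases ih with h1 | ⟨h1, h2⟩ | ⟨h1, h2⟩
        · exact Or.inr (Or.inl ⟨h1, .refl⟩)
        · exact Or.inr (Or.inl ⟨h1, .refl⟩)
        · exact Or.inl h1
      · subst hbj; subst hci
        rcases ih with h1 | ⟨h1, h2⟩ | ⟨h1, h2⟩
        · exact Or.inr (Or.inr ⟨h1, .refl⟩)
        · exact Or.inl h1
        · exact Or.inr (Or.inr ⟨h1, .refl⟩)
  · intro h
    have mono : ∀ {x y : Nat}, Relation.ReflTransGen r x y →
        Relation.ReflTransGen (fun x y => r x y ∨ (x = i ∧ y = j) ∨ (x = j ∧ y = i)) x y := by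
      intro x y hxy
      exact Relation.ReflTransGen.mono (fun a b hab => Or.inl hab) hxy
    rcases h with h1 | ⟨h1, h2⟩ | ⟨h1, h2⟩
    · exact mono h1
    · exact ((mono h1).tail (Or.inr (Or.inl ⟨rfl, rfl⟩))).trans (mono h2)
    · exact ((mono h1).tail (Or.inr (Or.inr ⟨rfl, rfl⟩))).trans (mono h2)


-- ---------- combine, pointwise ----------
lemma combine_eq_map (cur tgt : List Int) :
    combine cur tgt = (List.range cur.length).map
      (fun k => if k < cur.length / 2 then min (cur.getD k 0) (tgt.getD k 0)
                else max (cur.getD k 0) (tgt.getD k 0)) := by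
  unfold combine
  rw [PySem.List.foldl_append_singleton_eq_map]
  simp

def foldCombine (bl : List (List Int)) (j0 : Nat) (ms : List Nat) : List Int :=
  ms.foldl (fun t x => combine t (bl.getD x [])) (bx bl j0)

def mmOf (bl : List (List Int)) (d : Nat) (S : Finset Nat) : List Int :=
  (List.range d).map (fun k =>
    if k < d / 2 then ((S.image (vB bl k)).min).untopD 0
    else ((S.image (vB bl k)).max).unbotD 0)

lemma pv_min_insert (a : Int) (s : Finset Int) (hs : s.Nonempty) :
    ((insert a s).min).untopD 0 = min a (s.min.untopD 0) := by
  obtain ⟨v, hv⟩ := Finset.min_of_nonempty hs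
  rw [Finset.min_insert, hv]
  rfl

lemma pv_max_insert (a : Int) (s : Finset Int) (hs : s.Nonempty) :
    ((insert a s).max).unbotD 0 = max a (s.max.unbotD 0) := by
  obtain ⟨v, hv⟩ := Finset.max_of_nonempty hs
  rw [Finset.max_insert, hv]
  rfl

lemma FC_char (bl : List (List Int)) (d : Nat) (j0 : Nat) (ms : List Nat)
    (hj0 : (bx bl j0).length = d) (hms : ∀ x ∈ ms, (bx bl x).length = d) :
    foldCombine bl j0 ms = mmOf bl d (insert j0 ms.toFinset) := by
  induction ms using List.reverseRecOn with
  | nil =>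
    unfold foldCombine mmOf
    simp only [List.foldl_nil, List.toFinset_nil, insert_empty_eq, Finset.image_singleton,
      Finset.min_singleton, Finset.max_singleton]
    rw [← hj0]
    conv_lhs => rw [← pv_map_getD_range (bx bl j0)]
    apply List.map_congr_left
    intro k hk
    by_cases hk2 : k < (bx bl j0).length / 2 <;> simp [hk2, vB]
  | append_singleton ms x ih =>
    have hms' : ∀ y ∈ ms, (bx bl y).length = d := fun y hy => hms y (List.mem_append_left _ hy)
    unfold foldCombine at ih ⊢
    rw [List.foldl_append, List.foldl_cons, List.foldl_nil, ih hms']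
    have hlen : (mmOf bl d (insert j0 ms.toFinset)).length = d := by
      unfold mmOf; simp
    rw [combine_eq_map, hlen]
    have hsets : insert j0 (ms ++ [x]).toFinset = insert x (insert j0 ms.toFinset) := by
      apply Finset.ext; intro z
      simp only [List.toFinset_append, Finset.mem_insert, Finset.mem_union, List.mem_toFinset,
        List.toFinset_cons, List.toFinset_nil, insert_empty_eq, Finset.mem_singleton]
      tauto
    unfold mmOf
    rw [hsets]
    apply List.map_congr_left
    intro k hk
    simp only [List.mem_range] at hk
    have hne : ((insert j0 ms.toFinset).image (vB bl k)).Nonempty :=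
      (Finset.insert_nonempty _ _).image _
    have hget : (bl.getD x []).getD k 0 = vB bl k x := rfl
    rw [Finset.image_insert]
    by_cases hk2 : k < d / 2
    · simp only [hk2, if_true]
      rw [pv_min_insert _ _ hne, PySem.List.getD_map_range _ _ _ _ hk, hget]
      simp only [hk2, if_true]
      rw [min_comm]
    · simp only [hk2, if_false]
      rw [pv_max_insert _ _ hne, PySem.List.getD_map_range _ _ _ _ hk, hget]
      simp only [hk2, if_false]
      rw [max_comm]

lemma FC_ext (bl : List (List Int)) (d : Nat) (j0 j0' : Nat) (ms ms' : List Nat)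
    (hj0 : (bx bl j0).length = d) (hms : ∀ x ∈ ms, (bx bl x).length = d)
    (hj0' : (bx bl j0').length = d) (hms' : ∀ x ∈ ms', (bx bl x).length = d)
    (hset : insert j0 ms.toFinset = insert j0' ms'.toFinset) :
    foldCombine bl j0 ms = foldCombine bl j0' ms' := by
  rw [FC_char bl d j0 ms hj0 hms, FC_char bl d j0' ms' hj0' hms', hset]

-- ---------- B: label-merging phase ----------
def stepB (bl : List (List Int)) (std : List Int) (L : List Nat) (p : Nat × Nat) : List Nat :=
  if near_bound (bl.getD p.1 []) (bl.getD p.2 []) std ||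
     near_bound (bl.getD p.2 []) (bl.getD p.1 []) std then
    let a := L.getD p.1 0
    let b := L.getD p.2 0
    if a ≠ b then L.map (fun l => if l = max a b then min a b else l) else L
  else L

def allPairsB (n : Nat) : List (Nat × Nat) :=
  (List.range n).flatMap (fun i => (List.range' (i + 1) (n - (i + 1))).map (fun j => (i, j)))

def labelsOf (bl : List (List Int)) (std : List Int) : List Nat :=
  (allPairsB bl.length).foldl (stepB bl std) (List.range bl.length)

lemma alt_eq_labelsOf (bl : List (List Int)) (std : List Int) :
    combine_bound_list_alt bl std =
      (List.range bl.length).foldl (fun out r =>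
        if (labelsOf bl std).getD r 0 = r then
          out ++ [(List.range bl.length).foldl (fun merged k =>
              if (labelsOf bl std).getD k 0 = r then combine merged (bl.getD k []) else merged)
            (bl.getD r [])]
        else out) [] := by
  unfold combine_bound_list_alt labelsOf allPairsB stepB
  rw [List.foldl_flatMap]
  simp only [List.foldl_map]

def GoodL (R : Nat → Nat → Prop) (n : Nat) (L : List Nat) : Prop :=
  L.length = n ∧ ∀ k, k < n →
    Relation.ReflTransGen R k (L.getD k 0) ∧ ∀ j, Relation.ReflTransGen R k j → L.getD k 0 ≤ j

lemma goodL_class_eq {R : Nat → Nat → Prop} {n : Nat} {L : List Nat}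
    (hs : ∀ a b, R a b → R b a) (h : GoodL R n L) {k m : Nat} (hk : k < n) (hm : m < n) :
    Relation.ReflTransGen R k m ↔ L.getD k 0 = L.getD m 0 := by
  obtain ⟨-, hgood⟩ := h
  obtain ⟨hk1, hk2⟩ := hgood k hk
  obtain ⟨hm1, hm2⟩ := hgood m hm
  constructor
  · intro hkm
    have h1 : L.getD k 0 ≤ L.getD m 0 := hk2 _ (hkm.trans hm1)
    have h2 : L.getD m 0 ≤ L.getD k 0 := hm2 _ ((rtg_symm hs hkm).trans hk1)
    omega
  · intro he
    exact (he ▸ hk1).trans (rtg_symm hs hm1)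

lemma goodL_step {R : Nat → Nat → Prop} {n : Nat} {L : List Nat}
    (hs : ∀ a b, R a b → R b a)
    (h : GoodL R n L) (i j : Nat) (hi : i < n) (hj : j < n) :
    GoodL (fun x y => R x y ∨ (x = i ∧ y = j) ∨ (x = j ∧ y = i)) n
      (if L.getD i 0 ≠ L.getD j 0 then
        L.map (fun l => if l = max (L.getD i 0) (L.getD j 0) then min (L.getD i 0) (L.getD j 0) else l)
      else L) := by
  obtain ⟨hL, hgood⟩ := h
  by_cases hab : L.getD i 0 ≠ L.getD j 0
  · rw [if_pos hab]
    set a := L.getD i 0 with ha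
    set b := L.getD j 0 with hb
    refine ⟨by simpa using hL, ?_⟩
    intro k hk
    have hgk : (L.map (fun l => if l = max a b then min a b else l)).getD k 0 =
        (fun l => if l = max a b then min a b else l) (L.getD k 0) :=
      pv_getD_map0 _ _ _ (by omega)
    have hmono : ∀ {x y : Nat}, Relation.ReflTransGen R x y →
        Relation.ReflTransGen (fun x y => R x y ∨ (x = i ∧ y = j) ∨ (x = j ∧ y = i)) x y :=
      fun hxy => Relation.ReflTransGen.mono (fun _ _ h => Or.inl h) hxy
    by_cases hmerge : Relation.ReflTransGen R k i ∨ Relation.ReflTransGen R k j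
    · have hLk : L.getD k 0 = a ∨ L.getD k 0 = b := by
        rcases hmerge with hki | hkj
        · exact Or.inl ((goodL_class_eq hs ⟨hL, hgood⟩ hk hi).mp hki)
        · exact Or.inr ((goodL_class_eq hs ⟨hL, hgood⟩ hk hj).mp hkj)
      have hval : (L.map (fun l => if l = max a b then min a b else l)).getD k 0 = min a b := by
        rw [hgk]
        rcases hLk with he | he <;> rw [he]
        · rcases max_choice a b with hm | hm
          · simp [hm]
          · have : a ≠ max a b := by omega
            simp [this]
            omega
        · rcases max_choice a b with hm | hm
          · have : b ≠ max a b := by omega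
            simp [this]
            omega
          · simp [hm]
      rw [hval]
      have hkab : Relation.ReflTransGen (fun x y => R x y ∨ (x = i ∧ y = j) ∨ (x = j ∧ y = i)) k a ∧
          Relation.ReflTransGen (fun x y => R x y ∨ (x = i ∧ y = j) ∨ (x = j ∧ y = i)) k b := by
        rcases hmerge with hki | hkj
        · refine ⟨(hmono hki).trans (hmono (hgood i hi).1), ?_⟩
          exact (((hmono hki).tail (Or.inr (Or.inl ⟨rfl, rfl⟩)))).trans (hmono (hgood j hj).1)
        · refine ⟨?_, (hmono hkj).trans (hmono (hgood j hj).1)⟩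
          exact (((hmono hkj).tail (Or.inr (Or.inr ⟨rfl, rfl⟩)))).trans (hmono (hgood i hi).1)
      constructor
      · rcases min_choice a b with hm | hm <;> rw [hm]
        · exact hkab.1
        · exact hkab.2
      · intro m hm
        rcases (rtg_merge i j).mp hm with h1 | ⟨h1, h2⟩ | ⟨h1, h2⟩
        · have := (hgood k hk).2 m h1
          rcases hLk with he | he <;> omega
        · have := (hgood j hj).2 m h2
          omega
        · have := (hgood i hi).2 m h2
          omega
    · push Not at hmerge
      obtain ⟨hki, hkj⟩ := hmerge
      have hne1 : L.getD k 0 ≠ a := fun he =>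
        hki ((goodL_class_eq hs ⟨hL, hgood⟩ hk hi).mpr he)
      have hne2 : L.getD k 0 ≠ b := fun he =>
        hkj ((goodL_class_eq hs ⟨hL, hgood⟩ hk hj).mpr he)
      have hval : (L.map (fun l => if l = max a b then min a b else l)).getD k 0 = L.getD k 0 := by
        rw [hgk]
        have hne : L.getD k 0 ≠ max a b := by
          rcases max_choice a b with hm | hm <;> rw [hm] <;> assumption
        show (if L.getD k 0 = max a b then min a b else L.getD k 0) = L.getD k 0
        rw [if_neg hne]
      rw [hval]
      constructor
      · exact hmono (hgood k hk).1
      · intro m hm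
        rcases (rtg_merge i j).mp hm with h1 | ⟨h1, h2⟩ | ⟨h1, h2⟩
        · exact (hgood k hk).2 m h1
        · exact absurd h1 hki
        · exact absurd h1 hkj
  · push Not at hab
    rw [if_neg (not_ne_iff.mpr hab)]
    have hij : Relation.ReflTransGen R i j := (goodL_class_eq hs ⟨hL, hgood⟩ hi hj).mpr hab
    have hiff : ∀ x y : Nat, Relation.ReflTransGen (fun x y => R x y ∨ (x = i ∧ y = j) ∨ (x = j ∧ y = i)) x y ↔
        Relation.ReflTransGen R x y := by
      intro x y
      rw [rtg_merge i j]
      constructor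
      · rintro (h1 | ⟨h1, h2⟩ | ⟨h1, h2⟩)
        · exact h1
        · exact (h1.trans hij).trans h2
        · exact (h1.trans (rtg_symm hs hij)).trans h2
      · exact Or.inl
    refine ⟨hL, ?_⟩
    intro k hk
    constructor
    · exact (hiff _ _).mpr (hgood k hk).1
    · intro m hm
      exact (hgood k hk).2 m ((hiff _ _).mp hm)

def Ep (bl : List (List Int)) (std : List Int) (ps : List (Nat × Nat)) (x y : Nat) : Prop :=
  ∃ p ∈ ps, (near_bound (bl.getD p.1 []) (bl.getD p.2 []) std ||
             near_bound (bl.getD p.2 []) (bl.getD p.1 []) std) = true ∧ ((x, y) = p ∨ (y, x) = p)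

lemma mem_allPairsB (n : Nat) (p : Nat × Nat) : p ∈ allPairsB n ↔ p.1 < p.2 ∧ p.2 < n := by
  unfold allPairsB
  rcases p with ⟨x, y⟩
  simp only [List.mem_flatMap, List.mem_map, List.mem_range, Prod.mk.injEq]
  constructor
  · rintro ⟨i, hi, j, hj, rfl, rfl⟩
    rw [List.mem_range'_1] at hj
    constructor <;> omega
  · rintro ⟨h1, h2⟩
    exact ⟨x, by omega, y, by rw [List.mem_range'_1]; omega, rfl, rfl⟩

lemma labels_fold (bl : List (List Int)) (std : List Int) (n : Nat) (hn : n = bl.length) :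
    ∀ (ps : List (Nat × Nat)), (∀ p ∈ ps, p.1 < p.2 ∧ p.2 < n) →
      ∀ (R : Nat → Nat → Prop) (L : List Nat),
        (∀ a b, R a b → R b a) → (∀ x y, R x y → x < n ∧ y < n) → GoodL R n L →
        GoodL (fun x y => R x y ∨ Ep bl std ps x y) n (ps.foldl (stepB bl std) L) := by
  intro ps
  induction ps with
  | nil =>
    intro _ R L hs hbd hg
    have hrel : (fun x y => R x y ∨ Ep bl std [] x y) = R := by
      funext x y; apply propext; simp [Ep]
    rw [List.foldl_nil, hrel]
    exact hg
  | cons p ps ih =>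
    intro hbnd R L hs hbd hg
    obtain ⟨hp12, hp2n⟩ := hbnd p (List.mem_cons_self)
    have hbnd' : ∀ q ∈ ps, q.1 < q.2 ∧ q.2 < n := fun q hq => hbnd q (List.mem_cons_of_mem _ hq)
    rw [List.foldl_cons]
    by_cases ht : (near_bound (bl.getD p.1 []) (bl.getD p.2 []) std ||
        near_bound (bl.getD p.2 []) (bl.getD p.1 []) std) = true
    · have hstep : stepB bl std L p =
          (if L.getD p.1 0 ≠ L.getD p.2 0 then
            L.map (fun l => if l = max (L.getD p.1 0) (L.getD p.2 0) then min (L.getD p.1 0) (L.getD p.2 0) else l)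
          else L) := by
        unfold stepB; rw [if_pos ht]
      have hg' := goodL_step hs hg p.1 p.2 (by omega) hp2n
      rw [hstep]
      have hres := ih hbnd' _ _
        (by
          rintro a b (h1 | ⟨rfl, rfl⟩ | ⟨rfl, rfl⟩)
          · exact Or.inl (hs _ _ h1)
          · exact Or.inr (Or.inr ⟨rfl, rfl⟩)
          · exact Or.inr (Or.inl ⟨rfl, rfl⟩))
        (by
          rintro x y (h1 | ⟨rfl, rfl⟩ | ⟨rfl, rfl⟩)
          · exact hbd _ _ h1
          · omega
          · omega)
        hg'
      have hrel : (fun x y => (R x y ∨ (x = p.1 ∧ y = p.2) ∨ (x = p.2 ∧ y = p.1)) ∨ Ep bl std ps x y) =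
          (fun x y => R x y ∨ Ep bl std (p :: ps) x y) := by
        funext x y
        apply propext
        simp only [Ep, List.mem_cons]
        constructor
        · rintro ((h1 | ⟨rfl, rfl⟩ | ⟨rfl, rfl⟩) | ⟨q, hq, hqt, hqm⟩)
          · exact Or.inl h1
          · exact Or.inr ⟨p, Or.inl rfl, ht, Or.inl rfl⟩
          · exact Or.inr ⟨p, Or.inl rfl, ht, Or.inr rfl⟩
          · exact Or.inr ⟨q, Or.inr hq, hqt, hqm⟩
        · rintro (h1 | ⟨q, hq | hq, hqt, hqm⟩)
          · exact Or.inl (Or.inl h1)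
          · subst hq
            rcases hqm with hm | hm
            · exact Or.inl (Or.inr (Or.inl ⟨congrArg Prod.fst hm, congrArg Prod.snd hm⟩))
            · exact Or.inl (Or.inr (Or.inr ⟨congrArg Prod.snd hm, congrArg Prod.fst hm⟩))
          · exact Or.inr ⟨q, hq, hqt, hqm⟩
      rw [← hrel]
      exact hres
    · have hstep : stepB bl std L p = L := by
        unfold stepB; rw [if_neg ht]
      rw [hstep]
      have hres := ih hbnd' R L hs hbd hg
      have hrel : (fun x y => R x y ∨ Ep bl std ps x y) =
          (fun x y => R x y ∨ Ep bl std (p :: ps) x y) := by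
        funext x y
        apply propext
        simp only [Ep, List.mem_cons]
        constructor
        · rintro (h1 | ⟨q, hq, hqt, hqm⟩)
          · exact Or.inl h1
          · exact Or.inr ⟨q, Or.inr hq, hqt, hqm⟩
        · rintro (h1 | ⟨q, hq | hq, hqt, hqm⟩)
          · exact Or.inl h1
          · subst hq; exact absurd hqt ht
          · exact Or.inr ⟨q, hq, hqt, hqm⟩
      rw [← hrel]
      exact hres

lemma Ep_allPairs_eq_EE (bl : List (List Int)) (std : List Int) :
    (fun x y => (fun _ _ => False) x y ∨ Ep bl std (allPairsB bl.length) x y) = EE bl std := by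
  funext x y
  apply propext
  simp only [false_or]
  unfold Ep EE
  constructor
  · rintro ⟨p, hp, hpt, hpm⟩
    rw [mem_allPairsB] at hp
    rw [Bool.or_eq_true] at hpt
    rcases hpm with hm | hm
    · obtain ⟨rfl, rfl⟩ : x = p.1 ∧ y = p.2 := ⟨congrArg Prod.fst hm, congrArg Prod.snd hm⟩
      exact ⟨by omega, by omega, by omega, by unfold bx; tauto⟩
    · obtain ⟨rfl, rfl⟩ : y = p.1 ∧ x = p.2 := ⟨congrArg Prod.fst hm, congrArg Prod.snd hm⟩
      exact ⟨by omega, by omega, by omega, by unfold bx; tauto⟩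
  · rintro ⟨hx, hy, hxy, hnear⟩
    rcases Nat.lt_or_ge x y with hlt | hge
    · refine ⟨(x, y), ?_, ?_, Or.inl rfl⟩
      · rw [mem_allPairsB]; exact ⟨hlt, hy⟩
      · rw [Bool.or_eq_true]; unfold bx at hnear; tauto
    · have hlt : y < x := by omega
      refine ⟨(y, x), ?_, ?_, Or.inr rfl⟩
      · rw [mem_allPairsB]; exact ⟨hlt, hx⟩
      · rw [Bool.or_eq_true]; unfold bx at hnear; tauto

lemma labels_good (bl : List (List Int)) (std : List Int) :
    GoodL (EE bl std) bl.length (labelsOf bl std) := by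
  have hbase : GoodL (fun _ _ => False) bl.length (List.range bl.length) := by
    constructor
    · exact List.length_range
    · intro k hk
      have hget : (List.range bl.length).getD k 0 = k := by
        rw [List.getD_eq_getElem?_getD, List.getElem?_range hk]
        rfl
      rw [hget]
      constructor
      · exact .refl
      · intro j hj
        cases (Relation.reflTransGen_iff_eq (fun _ h => h.elim)).mp hj
        exact le_refl k
  have h := labels_fold bl std bl.length rfl (allPairsB bl.length)
    (fun p hp => (mem_allPairsB _ _).mp hp) (fun _ _ => False) (List.range bl.length)
    (fun _ _ h => h.elim) (fun _ _ h => h.elim) hbase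
  rw [Ep_allPairs_eq_EE] at h
  exact h

-- ---------- A: relation matrix ----------
def stepA (bl : List (List Int)) (std : List Int) (rel : List (List Bool)) (p : Nat × Nat) :
    List (List Bool) :=
  if p.1 ≠ p.2 ∧ near_bound (bl.getD p.1 []) (bl.getD p.2 []) std = true then
    let rel1 := rel.set p.1 ((rel.getD p.1 []).set p.2 true)
    rel1.set p.2 ((rel1.getD p.2 []).set p.1 true)
  else rel

def allOPairs (n : Nat) : List (Nat × Nat) :=
  (List.range n).flatMap (fun i => (List.range n).map (fun j => (i, j)))

def relMatOf (bl : List (List Int)) (std : List Int) : List (List Bool) :=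
  (allOPairs bl.length).foldl (stepA bl std) (List.replicate bl.length (List.replicate bl.length false))

def MatP (bl : List (List Int)) (std : List Int) (ps : List (Nat × Nat)) (x y : Nat) : Prop :=
  ∃ p ∈ ps, p.1 ≠ p.2 ∧ near_bound (bl.getD p.1 []) (bl.getD p.2 []) std = true ∧
    ((x, y) = p ∨ (y, x) = p)

lemma mem_allOPairs (n : Nat) (p : Nat × Nat) : p ∈ allOPairs n ↔ p.1 < n ∧ p.2 < n := by
  unfold allOPairs
  rcases p with ⟨x, y⟩
  simp only [List.mem_flatMap, List.mem_map, List.mem_range, Prod.mk.injEq]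
  constructor
  · rintro ⟨i, hi, j, hj, rfl, rfl⟩
    exact ⟨hi, hj⟩
  · rintro ⟨h1, h2⟩
    exact ⟨x, h1, y, h2, rfl, rfl⟩

lemma matA_fold (bl : List (List Int)) (std : List Int) (n : Nat) :
    ∀ (ps : List (Nat × Nat)) (rel : List (List Bool)) (P : Nat → Nat → Prop),
      (∀ p ∈ ps, p.1 < n ∧ p.2 < n) → rel.length = n →
      (∀ x, x < n → (rel.getD x []).length = n) →
      (∀ x y, ((rel.getD x []).getD y false = true) ↔ P x y) →
      ((ps.foldl (stepA bl std) rel).length = n ∧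
       (∀ x, x < n → ((ps.foldl (stepA bl std) rel).getD x []).length = n) ∧
       (∀ x y, (((ps.foldl (stepA bl std) rel).getD x []).getD y false = true) ↔
          P x y ∨ MatP bl std ps x y)) := by
  intro ps
  induction ps with
  | nil =>
    intro rel P hbnd hlen hrow hchar
    simp only [List.foldl_nil]
    refine ⟨hlen, hrow, ?_⟩
    intro x y
    rw [hchar]
    simp [MatP]
  | cons p ps ih =>
    intro rel P hbnd hlen hrow hchar
    obtain ⟨hp1, hp2⟩ := hbnd p (List.mem_cons_self)
    have hbnd' : ∀ q ∈ ps, q.1 < n ∧ q.2 < n := fun q hq => hbnd q (List.mem_cons_of_mem _ hq)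
    rw [List.foldl_cons]
    by_cases hc : p.1 ≠ p.2 ∧ near_bound (bl.getD p.1 []) (bl.getD p.2 []) std = true
    · have hstep : stepA bl std rel p =
          (rel.set p.1 ((rel.getD p.1 []).set p.2 true)).set p.2
            (((rel.set p.1 ((rel.getD p.1 []).set p.2 true)).getD p.2 []).set p.1 true) := by
        unfold stepA; rw [if_pos hc]
      rw [hstep]
      set rel1 := rel.set p.1 ((rel.getD p.1 []).set p.2 true) with hrel1
      set rel2 := rel1.set p.2 ((rel1.getD p.2 []).set p.1 true) with hrel2
      have hlen1 : rel1.length = n := by rw [hrel1, List.length_set]; exact hlen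
      have hlen2 : rel2.length = n := by rw [hrel2, List.length_set]; exact hlen1
      have hget1 : ∀ x, rel1.getD x [] =
          if p.1 = x ∧ p.1 < n then (rel.getD p.1 []).set p.2 true else rel.getD x [] := by
        intro x; rw [hrel1, pv_getD_set, hlen]
      have hget2 : ∀ x, rel2.getD x [] =
          if p.2 = x ∧ p.2 < n then (rel1.getD p.2 []).set p.1 true else rel1.getD x [] := by
        intro x; rw [hrel2, pv_getD_set, hlen1]
      have hrow1 : ∀ x, x < n → (rel1.getD x []).length = n := by
        intro x hx
        rw [hget1]
        split_ifs with h
        · rw [List.length_set]; exact hrow _ (h.1 ▸ hp1)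
        · exact hrow _ hx
      have hrow2 : ∀ x, x < n → (rel2.getD x []).length = n := by
        intro x hx
        rw [hget2]
        split_ifs with h
        · rw [List.length_set]; exact hrow1 _ hp2
        · exact hrow1 _ hx
      have hchar2 : ∀ x y, ((rel2.getD x []).getD y false = true) ↔
          (P x y ∨ (x = p.1 ∧ y = p.2) ∨ (x = p.2 ∧ y = p.1)) := by
        intro x y
        have hent1 : ∀ x y, ((rel1.getD x []).getD y false = true) ↔
            (P x y ∨ (x = p.1 ∧ y = p.2)) := by
          intro x y
          rw [hget1]
          by_cases hx : p.1 = x ∧ p.1 < n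
          · obtain ⟨he, -⟩ := hx
            subst he
            rw [if_pos ⟨rfl, hp1⟩, pv_getD_set, hrow _ hp1]
            by_cases hy : p.2 = y ∧ p.2 < n
            · obtain ⟨he2, -⟩ := hy
              subst he2
              rw [if_pos ⟨rfl, hp2⟩]
              simp
            · rw [if_neg hy, hchar]
              have : ¬(p.1 = p.1 ∧ y = p.2) := by
                rintro ⟨-, rfl⟩; exact hy ⟨rfl, hp2⟩
              tauto
          · rw [if_neg hx, hchar]
            have : ¬(x = p.1 ∧ y = p.2) := by
              rintro ⟨rfl, rfl⟩; exact hx ⟨rfl, hp1⟩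
            tauto
        rw [hget2]
        by_cases hx : p.2 = x ∧ p.2 < n
        · obtain ⟨he, -⟩ := hx
          subst he
          rw [if_pos ⟨rfl, hp2⟩, pv_getD_set, hrow1 _ hp2]
          by_cases hy : p.1 = y ∧ p.1 < n
          · obtain ⟨he2, -⟩ := hy
            subst he2
            rw [if_pos ⟨rfl, hp1⟩]
            simp
          · rw [if_neg hy, hent1]
            have h1 : ¬(p.2 = p.2 ∧ y = p.1) := by
              rintro ⟨-, rfl⟩; exact hy ⟨rfl, hp1⟩
            have h2 : ¬(p.2 = p.1 ∧ y = p.2) := by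
              rintro ⟨he3, -⟩; exact hc.1 he3.symm
            tauto
        · rw [if_neg hx, hent1]
          have h1 : ¬(x = p.2 ∧ y = p.1) := by
            rintro ⟨rfl, rfl⟩; exact hx ⟨rfl, hp2⟩
          tauto
      obtain ⟨hl, hr, hch⟩ := ih rel2
        (fun x y => P x y ∨ (x = p.1 ∧ y = p.2) ∨ (x = p.2 ∧ y = p.1))
        hbnd' hlen2 hrow2 hchar2
      refine ⟨hl, hr, ?_⟩
      intro x y
      rw [hch]
      unfold MatP
      simp only [List.mem_cons]
      constructor
      · rintro ((h1 | ⟨rfl, rfl⟩ | ⟨rfl, rfl⟩) | ⟨q, hq, hqc, hqn, hqm⟩)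
        · exact Or.inl h1
        · exact Or.inr ⟨p, Or.inl rfl, hc.1, hc.2, Or.inl rfl⟩
        · exact Or.inr ⟨p, Or.inl rfl, hc.1, hc.2, Or.inr rfl⟩
        · exact Or.inr ⟨q, Or.inr hq, hqc, hqn, hqm⟩
      · rintro (h1 | ⟨q, hq | hq, hqc, hqn, hqm⟩)
        · exact Or.inl (Or.inl h1)
        · subst hq
          rcases hqm with hm | hm
          · exact Or.inl (Or.inr (Or.inl ⟨congrArg Prod.fst hm, congrArg Prod.snd hm⟩))
          · exact Or.inl (Or.inr (Or.inr ⟨congrArg Prod.snd hm, congrArg Prod.fst hm⟩))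
        · exact Or.inr ⟨q, hq, hqc, hqn, hqm⟩
    · have hstep : stepA bl std rel p = rel := by
        unfold stepA; rw [if_neg hc]
      rw [hstep]
      obtain ⟨hl, hr, hch⟩ := ih rel P hbnd' hlen hrow hchar
      refine ⟨hl, hr, ?_⟩
      intro x y
      rw [hch]
      unfold MatP
      simp only [List.mem_cons]
      constructor
      · rintro (h1 | ⟨q, hq, hqc, hqn, hqm⟩)
        · exact Or.inl h1
        · exact Or.inr ⟨q, Or.inr hq, hqc, hqn, hqm⟩
      · rintro (h1 | ⟨q, hq | hq, hqc, hqn, hqm⟩)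
        · exact Or.inl h1
        · subst hq; exact absurd ⟨hqc, hqn⟩ hc
        · exact Or.inr ⟨q, hq, hqc, hqn, hqm⟩

lemma relMat_entry (bl : List (List Int)) (std : List Int) (x y : Nat) :
    ((relMatOf bl std).getD x []).getD y false = true ↔ EE bl std x y := by
  unfold relMatOf
  have hinit : ∀ x y, (((List.replicate bl.length (List.replicate bl.length false)).getD x []).getD y false = true) ↔ False := by
    intro x y
    simp only [iff_false]
    intro h
    simp only [List.getD_eq_getElem?_getD, List.getElem?_replicate] at h
    by_cases hx : x < bl.length
    · rw [if_pos hx] at h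
      simp only [Option.getD_some] at h
      rw [List.getElem?_replicate] at h
      by_cases hy : y < bl.length
      · rw [if_pos hy] at h; simp at h
      · rw [if_neg hy] at h; simp at h
    · rw [if_neg hx] at h
      simp at h
  obtain ⟨-, -, hch⟩ := matA_fold bl std bl.length (allOPairs bl.length)
    (List.replicate bl.length (List.replicate bl.length false)) (fun _ _ => False)
    (fun p hp => (mem_allOPairs _ _).mp hp) (by simp) (by
      intro x hx
      rw [List.getD_eq_getElem?_getD, List.getElem?_replicate, if_pos hx]
      simp) hinit
  rw [hch]
  unfold MatP EE
  constructor
  · rintro (h | ⟨q, hq, hqc, hqn, hqm⟩)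
    · exact h.elim
    · rw [mem_allOPairs] at hq
      rcases hqm with hm | hm
      · obtain ⟨rfl, rfl⟩ : x = q.1 ∧ y = q.2 := ⟨congrArg Prod.fst hm, congrArg Prod.snd hm⟩
        exact ⟨hq.1, hq.2, hqc, Or.inl hqn⟩
      · obtain ⟨rfl, rfl⟩ : y = q.1 ∧ x = q.2 := ⟨congrArg Prod.fst hm, congrArg Prod.snd hm⟩
        exact ⟨hq.2, hq.1, fun he => hqc he.symm, Or.inr hqn⟩
  · rintro ⟨hx, hy, hxy, hnear | hnear⟩
    · exact Or.inr ⟨(x, y), (mem_allOPairs _ _).mpr ⟨hx, hy⟩, hxy, hnear, Or.inl rfl⟩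
    · exact Or.inr ⟨(y, x), (mem_allOPairs _ _).mpr ⟨hy, hx⟩, fun he => hxy he.symm, hnear, Or.inr rfl⟩

-- ---------- A: BFS ----------
lemma pv_mem_add (s : List Nat) (x y : Nat) : y ∈ PySem.Set.add s x ↔ y ∈ s ∨ y = x := by
  by_cases h : x ∈ s
  · rw [pv_set_add_mem h]
    constructor
    · exact Or.inl
    · rintro (h1 | rfl)
      · exact h1
      · exact h
  · rw [pv_set_add_not_mem h]
    simp

lemma gnbl_mem (bl : List (List Int)) (std : List Int) (x y : Nat) :
    y ∈ get_near_bound_list (relMatOf bl std) x bl ↔ y < bl.length ∧ EE bl std x y := by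
  unfold get_near_bound_list
  rw [PySem.List.foldl_append_if_eq_filter]
  simp only [List.nil_append, List.mem_filter, List.mem_range]
  rw [relMat_entry]

def BfsP (bl : List (List Int)) (std : List Int) (q s : List Nat) (tmp : List Int) (flags : List Bool) : Prop :=
  (∀ x ∈ q, x < bl.length) → (∀ x ∈ s, x < bl.length) →
  (∀ u ∈ s, ∀ w, EE bl std u w → w ∈ s ∨ w ∈ q) → flags.length = bl.length →
  (∀ y, y ∈ (bfsLoop bl (relMatOf bl std) q s tmp flags).2.2 ↔
      y ∈ s ∨ ∃ x ∈ q, Relation.ReflTransGen (EE bl std) x y) ∧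
  ∃ pop : List Nat, (∀ x ∈ pop, x < bl.length) ∧
    (bfsLoop bl (relMatOf bl std) q s tmp flags).1 =
      pop.foldl (fun t x => combine t (bl.getD x [])) tmp ∧
    (∀ y, y ∈ (bfsLoop bl (relMatOf bl std) q s tmp flags).2.2 ↔ y ∈ s ∨ y ∈ pop) ∧
    (bfsLoop bl (relMatOf bl std) q s tmp flags).2.1.length = bl.length ∧
    (∀ j, (bfsLoop bl (relMatOf bl std) q s tmp flags).2.1.getD j false =
      (flags.getD j false || decide (j ∈ pop)))

lemma pv_bfs_step (bl : List (List Int)) (std : List Int) (index : Nat) (q s : List Nat)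
    (tmp : List Int) (flags : List Bool)
    (IH : BfsP bl std
      (q ++ (get_near_bound_list (relMatOf bl std) index bl).filter
        (fun y => decide (y ∉ PySem.Set.add s index)))
      (PySem.Set.add s index) (combine tmp (bl.getD index [])) (flags.set index true)) :
    BfsP bl std (index :: q) s tmp flags := by
  unfold BfsP at IH ⊢
  intro h1 h2 h3 hflen
  have hidx : index < bl.length := h1 index List.mem_cons_self
  have hq : ∀ x ∈ q, x < bl.length := fun x hx => h1 x (List.mem_cons_of_mem _ hx)
  rw [bfsLoop]
  have hmemadd : ∀ y, y ∈ PySem.Set.add s index ↔ y ∈ s ∨ y = index := fun y => pv_mem_add s index y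
  have h1' : ∀ x ∈ q ++ (get_near_bound_list (relMatOf bl std) index bl).filter
      (fun y => decide (y ∉ PySem.Set.add s index)), x < bl.length := by
    intro x hx
    rcases List.mem_append.mp hx with hx | hx
    · exact hq x hx
    · exact ((gnbl_mem bl std index x).mp (List.mem_of_mem_filter hx)).1
  have h2' : ∀ x ∈ PySem.Set.add s index, x < bl.length := by
    intro x hx
    rcases (hmemadd x).mp hx with hx | rfl
    · exact h2 x hx
    · exact hidx
  have h3' : ∀ u ∈ PySem.Set.add s index, ∀ w, EE bl std u w →
      w ∈ PySem.Set.add s index ∨ w ∈ q ++ (get_near_bound_list (relMatOf bl std) index bl).filter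
        (fun y => decide (y ∉ PySem.Set.add s index)) := by
    intro u hu w hw
    rcases (hmemadd u).mp hu with hus | hui
    · rcases h3 u hus w hw with h | h
      · exact Or.inl ((hmemadd w).mpr (Or.inl h))
      · rcases List.mem_cons.mp h with rfl | h
        · exact Or.inl ((hmemadd w).mpr (Or.inr rfl))
        · exact Or.inr (List.mem_append_left _ h)
    · by_cases hws : w ∈ PySem.Set.add s index
      · exact Or.inl hws
      · refine Or.inr (List.mem_append_right _ ?_)
        rw [List.mem_filter]
        refine ⟨(gnbl_mem bl std index w).mpr ⟨hw.2.1, hui ▸ hw⟩, by simpa using hws⟩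
  have hflen' : (flags.set index true).length = bl.length := by
    rw [List.length_set]; exact hflen
  obtain ⟨hC1, pop', hpop1, hpop2, hpop3, hpop4, hpop5⟩ := IH h1' h2' h3' hflen'
  set r := bfsLoop bl (relMatOf bl std)
    (q ++ (get_near_bound_list (relMatOf bl std) index bl).filter
      (fun y => decide (y ∉ PySem.Set.add s index)))
    (PySem.Set.add s index) (combine tmp (bl.getD index [])) (flags.set index true) with hr
  constructor
  · -- reachability characterization
    intro y
    rw [hC1 y]
    constructor
    · rintro (hy | ⟨x, hx, hrtg⟩)
      · rcases (hmemadd y).mp hy with hy | hyi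
        · exact Or.inl hy
        · exact Or.inr ⟨index, List.mem_cons_self, by rw [hyi]⟩
      · rcases List.mem_append.mp hx with hx | hx
        · exact Or.inr ⟨x, List.mem_cons_of_mem _ hx, hrtg⟩
        · have hex : EE bl std index x :=
            ((gnbl_mem bl std index x).mp (List.mem_of_mem_filter hx)).2
          exact Or.inr ⟨index, List.mem_cons_self, (Relation.ReflTransGen.single hex).trans hrtg⟩
    · rintro (hy | ⟨x, hx, hrtg⟩)
      · exact Or.inl ((hmemadd y).mpr (Or.inl hy))
      · rcases List.mem_cons.mp hx with hxi | hx
        · -- x = index : closure argument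
          rw [hxi] at hrtg
          have := rtg_closed (r := EE bl std)
            (T := fun w => w ∈ PySem.Set.add s index ∨
              ∃ x ∈ q ++ (get_near_bound_list (relMatOf bl std) index bl).filter
                (fun y => decide (y ∉ PySem.Set.add s index)),
                Relation.ReflTransGen (EE bl std) x w)
            (by
              intro z w hz hzw
              rcases hz with hz | ⟨x, hx, hrtg2⟩
              · rcases h3' z hz w hzw with h | h
                · exact Or.inl h
                · exact Or.inr ⟨w, h, .refl⟩
              · exact Or.inr ⟨x, hx, hrtg2.tail hzw⟩)
            (Or.inl ((hmemadd index).mpr (Or.inr rfl))) hrtg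
          exact this
        · exact Or.inr ⟨x, List.mem_append_left _ hx, hrtg⟩
  · refine ⟨index :: pop', ?_, ?_, ?_, hpop4, ?_⟩
    · intro x hx
      rcases List.mem_cons.mp hx with rfl | hx
      · exact hidx
      · exact hpop1 x hx
    · rw [hpop2, List.foldl_cons]
    · intro y
      rw [hpop3 y, hmemadd y, List.mem_cons]
      tauto
    · intro j
      rw [hpop5 j, pv_getD_set, hflen]
      by_cases hj : index = j
      · rw [if_pos ⟨hj, hidx⟩]
        have : j ∈ index :: pop' := by rw [List.mem_cons]; exact Or.inl hj.symm
        simp [this]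
      · have hcond : ¬(index = j ∧ index < bl.length) := fun h => hj h.1
        rw [if_neg hcond]
        have hiff : (j ∈ index :: pop') ↔ (j ∈ pop') := by
          rw [List.mem_cons]
          constructor
          · rintro (h | h)
            · exact absurd h.symm hj
            · exact h
          · exact Or.inr
        simp [hiff]

lemma bfs_spec (bl : List (List Int)) (std : List Int) :
    ∀ (q s : List Nat) (tmp : List Int) (flags : List Bool), BfsP bl std q s tmp flags := by
  intro q s tmp flags
  induction q, s, tmp, flags using bfsLoop.induct bl (relMatOf bl std) with
  | case1 s tmp flags =>
    unfold BfsP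
    intro h1 h2 h3 hflen
    rw [bfsLoop]
    refine ⟨by simp, [], by simp, by simp, by simp, hflen, by simp⟩
  | case2 index q s tmp flags IH =>
    rename_i IHr
    exact pv_bfs_step bl std index q s tmp flags IHr

-- ---------- outer loops and the final assembly ----------
def stepOut (bl : List (List Int)) (std : List Int) (acc : List (List Int) × List Bool) (i : Nat) :
    List (List Int) × List Bool :=
  if acc.2.getD i false then acc
  else (acc.1 ++ [(bfsLoop bl (relMatOf bl std) [i] [] (bl.getD i []) acc.2).1],
        (bfsLoop bl (relMatOf bl std) [i] [] (bl.getD i []) acc.2).2.1)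

lemma A_eq_fold (bl : List (List Int)) (std : List Int) :
    combine_bound_list bl std =
      ((List.range bl.length).foldl (stepOut bl std) ([], List.replicate bl.length false)).1 := by
  have h0 : (List.range bl.length).foldl (fun rel _ => rel ++ [List.replicate bl.length false]) [] =
      List.replicate bl.length (List.replicate bl.length false) := by
    rw [PySem.List.foldl_append_singleton_eq_map (f := fun _ => List.replicate bl.length false)]
    simp
  have h1 : ∀ init : List (List Bool),
      (List.range bl.length).foldl (fun rel i =>
        (List.range bl.length).foldl (fun rel j =>
          if i ≠ j ∧ near_bound (bl.getD i []) (bl.getD j []) std then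
            let rel1 := rel.set i ((rel.getD i []).set j true)
            rel1.set j ((rel1.getD j []).set i true)
          else rel) rel) init =
      (allOPairs bl.length).foldl (stepA bl std) init := by
    intro init
    unfold allOPairs
    rw [List.foldl_flatMap]
    simp only [List.foldl_map]
    rfl
  unfold combine_bound_list
  dsimp only
  rw [h0, h1]
  rfl

lemma outer_inv (bl : List (List Int)) (std : List Int)
    (hd : ∀ b ∈ bl, b.length = (bl.headD []).length) :
    ∀ m, m ≤ bl.length →
      (((List.range m).foldl (stepOut bl std) ([], List.replicate bl.length false)).2.length = bl.length) ∧
      (∀ j, ((List.range m).foldl (stepOut bl std) ([], List.replicate bl.length false)).2.getD j false = true ↔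
          ∃ i, i < m ∧ Relation.ReflTransGen (EE bl std) i j) ∧
      (((List.range m).foldl (stepOut bl std) ([], List.replicate bl.length false)).1 =
        ((List.range m).filter (fun r => decide ((labelsOf bl std).getD r 0 = r))).map
          (fun r => foldCombine bl r
            ((List.range bl.length).filter (fun k => decide ((labelsOf bl std).getD k 0 = r))))) := by
  -- shared facts about the labels and the relation
  obtain ⟨hLlen, hLgood⟩ := labels_good bl std
  have hsym : ∀ a b, EE bl std a b → EE bl std b a := fun a b h => EE_symm bl std a b h
  have hbd : ∀ x y, EE bl std x y → x < bl.length ∧ y < bl.length := fun x y h => ⟨h.1, h.2.1⟩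
  have hdlen : ∀ j, j < bl.length → (bx bl j).length = (bl.headD []).length := by
    intro j hj
    apply hd
    unfold bx
    rw [List.getD_eq_getElem?_getD, List.getElem?_eq_getElem hj]
    exact List.getElem_mem hj
  have hminiff : ∀ i, i < bl.length →
      ((∃ m, m < i ∧ Relation.ReflTransGen (EE bl std) m i) ↔ (labelsOf bl std).getD i 0 ≠ i) := by
    intro i hi
    constructor
    · rintro ⟨m, hmi, hrtg⟩
      have := (hLgood i hi).2 m (rtg_symm hsym hrtg)
      omega
    · intro hne
      have hle := (hLgood i hi).2 i .refl
      refine ⟨(labelsOf bl std).getD i 0, by omega, rtg_symm hsym (hLgood i hi).1⟩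
  have hbox : ∀ (i : Nat) (pop : List Nat), i < bl.length → (labelsOf bl std).getD i 0 = i → (∀ x ∈ pop, x < bl.length) →
      (∀ y, y ∈ pop ↔ Relation.ReflTransGen (EE bl std) i y) →
      pop.foldl (fun t x => combine t (bl.getD x [])) (bl.getD i []) =
        foldCombine bl i ((List.range bl.length).filter (fun k => decide ((labelsOf bl std).getD k 0 = i))) := by
    intro i pop hi hLi hpopn hpopc
    show foldCombine bl i pop = _
    apply FC_ext bl (bl.headD []).length
    · exact hdlen i hi
    · intro x hx; exact hdlen x (hpopn x hx)
    · exact hdlen i hi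
    · intro x hx
      rw [List.mem_filter, List.mem_range] at hx
      exact hdlen x hx.1
    · apply Finset.ext
      intro y
      simp only [Finset.mem_insert, List.mem_toFinset, List.mem_filter, List.mem_range,
        decide_eq_true_eq]
      rw [hpopc y]
      constructor
      · rintro (rfl | hrtg)
        · exact Or.inl rfl
        · refine Or.inr ⟨rtg_lt hbd hi hrtg, ?_⟩
          have := (goodL_class_eq hsym ⟨hLlen, hLgood⟩ hi (rtg_lt hbd hi hrtg)).mp hrtg
          omega
      · rintro (rfl | ⟨hy, hLy⟩)
        · exact Or.inl rfl
        · refine Or.inr ((goodL_class_eq hsym ⟨hLlen, hLgood⟩ hi hy).mpr (by omega))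
  intro m
  induction m with
  | zero =>
    intro _
    simp only [List.range_zero, List.foldl_nil]
    refine ⟨by simp, ?_, by simp⟩
    intro j
    constructor
    · intro h
      exfalso
      by_cases hj : j < bl.length
      · rw [List.getD_eq_getElem?_getD, List.getElem?_replicate, if_pos hj] at h
        simp at h
      · rw [List.getD_eq_getElem?_getD, List.getElem?_replicate, if_neg hj] at h
        simp at h
    · rintro ⟨i, hi, -⟩
      omega
  | succ m ih =>
    intro hm1
    have hm : m < bl.length := by omega
    obtain ⟨ihlen, ihflag, ihout⟩ := ih (by omega)
    rw [List.range_succ, List.foldl_append, List.foldl_cons, List.foldl_nil]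
    set st := (List.range m).foldl (stepOut bl std) ([], List.replicate bl.length false) with hst
    by_cases hfl : st.2.getD m false = true
    · have hstep : stepOut bl std st m = st := by
        unfold stepOut; rw [if_pos hfl]
      rw [hstep]
      have hflagged := (ihflag m).mp hfl
      have hLm : (labelsOf bl std).getD m 0 ≠ m := (hminiff m hm).mp hflagged
      refine ⟨ihlen, ?_, ?_⟩
      · intro j
        rw [ihflag j]
        constructor
        · rintro ⟨i, hi, hrtg⟩
          exact ⟨i, by omega, hrtg⟩
        · rintro ⟨i, hi, hrtg⟩
          by_cases him : i = m
          · subst him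
            obtain ⟨i', hi', hrtg'⟩ := hflagged
            exact ⟨i', hi', hrtg'.trans hrtg⟩
          · exact ⟨i, by omega, hrtg⟩
      · rw [ihout, List.filter_append, List.map_append]
        have hdm : decide ((labelsOf bl std).getD m 0 = m) = false := by
          simpa using hLm
        have : (List.filter (fun r => decide ((labelsOf bl std).getD r 0 = r)) [m]) = [] := by
          simp only [List.filter_cons, List.filter_nil, hdm]
          simp
        rw [this]
        simp
    · have hstep : stepOut bl std st m =
          (st.1 ++ [(bfsLoop bl (relMatOf bl std) [m] [] (bl.getD m []) st.2).1],
           (bfsLoop bl (relMatOf bl std) [m] [] (bl.getD m []) st.2).2.1) := by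
        unfold stepOut; rw [if_neg hfl]
      rw [hstep]
      have hunflagged : ¬∃ i, i < m ∧ Relation.ReflTransGen (EE bl std) i m := by
        intro h
        exact hfl ((ihflag m).mpr h)
      have hLm : (labelsOf bl std).getD m 0 = m := by
        by_contra hne
        exact hunflagged ((hminiff m hm).mpr hne)
      obtain ⟨hC1, pop, hpop1, hpop2, hpop3, hpop4, hpop5⟩ :=
        bfs_spec bl std [m] [] (bl.getD m []) st.2
          (by intro x hx; rw [List.mem_singleton] at hx; omega)
          (by simp) (by simp) ihlen
      have hpopc : ∀ y, y ∈ pop ↔ Relation.ReflTransGen (EE bl std) m y := by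
        intro y
        rw [show (y ∈ pop) ↔ (y ∈ [] ∨ y ∈ pop) by simp, ← hpop3 y, hC1 y]
        simp
      refine ⟨hpop4, ?_, ?_⟩
      · intro j
        rw [hpop5 j]
        constructor
        · intro h
          rcases Bool.or_eq_true _ _ |>.mp h with h | h
          · obtain ⟨i, hi, hrtg⟩ := (ihflag j).mp h
            exact ⟨i, by omega, hrtg⟩
          · have := (hpopc j).mp (by simpa using h)
            exact ⟨m, by omega, this⟩
        · rintro ⟨i, hi, hrtg⟩
          by_cases him : i = m
          · subst him
            refine Bool.or_eq_true _ _ |>.mpr (Or.inr ?_)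
            simpa using (hpopc j).mpr hrtg
          · exact Bool.or_eq_true _ _ |>.mpr (Or.inl ((ihflag j).mpr ⟨i, by omega, hrtg⟩))
      · rw [ihout, List.filter_append, List.map_append]
        have hdm : decide ((labelsOf bl std).getD m 0 = m) = true := by
          simpa using hLm
        have hfm : (List.filter (fun r => decide ((labelsOf bl std).getD r 0 = r)) [m]) = [m] := by
          simp only [List.filter_cons, List.filter_nil, hdm]
          simp
        rw [hfm, hpop2]
        simp only [List.map_cons, List.map_nil]
        rw [hbox m pop hm hLm hpop1 hpopc]

lemma main_eq (bl : List (List Int)) (std : List Int)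
    (hd : ∀ b ∈ bl, b.length = (bl.headD []).length) :
    combine_bound_list bl std = combine_bound_list_alt bl std := by
  rw [A_eq_fold, (outer_inv bl std hd bl.length (le_refl _)).2.2, alt_eq_labelsOf]
  rw [PySem.List.foldl_ite_eq_foldl_filter (p := fun r => (labelsOf bl std).getD r 0 = r)
    (f := fun out r => out ++ [(List.range bl.length).foldl (fun merged k =>
      if (labelsOf bl std).getD k 0 = r then combine merged (bl.getD k []) else merged)
      (bl.getD r [])])]
  rw [PySem.List.foldl_append_singleton_eq_map]
  simp only [List.nil_append]
  apply List.map_congr_left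
  intro r _
  rw [PySem.List.foldl_ite_eq_foldl_filter (p := fun k => (labelsOf bl std).getD k 0 = r)
    (f := fun merged k => combine merged (bl.getD k []))]
  rfl


-- ===== VERDICT (by name: the statement is the Claim_ definition above) =====
theorem combine_bound_list_spec : Claim_equal_combine_bound_list := by
  intro bl std _ hpre
  unfold Spec_combine_bound_list
  rcases hpre with h1 | ⟨hd, -⟩
  · match bl, h1 with
    | [], _ => exact main_eq [] std (by simp)
    | [x], _ => exact main_eq [x] std (by intro b hb; rw [List.mem_singleton] at hb; simp [hb])
  · exact main_eq bl std hd
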